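-- pv_equiv track=rewrite | github.com/rclsilver/advent-of-code | 2020/day-5/main.py | part_2
-- ===== SOURCE A (Python) =====
-- def parse_boarding_pass(boarding_pass):
--     remaining_ranges = [i for i in range(0, 128)]
--     remaining_columns = [i for i in range(0, 8)]
--
--     for c in boarding_pass[:7]:
--         middle = int(len(remaining_ranges) / 2)
--
--         if c == 'F':
--             remaining_ranges = remaining_ranges[:middle]
--         else:
--             remaining_ranges = remaining_ranges[-middle:]
--
--     for c in boarding_pass[-3:]:
--         middle = int(len(remaining_columns) / 2)
--
--         if c == 'L':
--             remaining_columns = remaining_columns[:middle]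
--         else:
--             remaining_columns = remaining_columns[-middle:]
--
--     return remaining_ranges[0] * 8 + remaining_columns[0]
--
-- def part_1(boarding_passes):
--     result = 0
--
--     for boarding_pass in boarding_passes:
--         place = parse_boarding_pass(boarding_pass)
--
--         if result < place:
--             result = place
--
--     return result
--
-- def part_2(boarding_passes):
--     places = dict((i, False) for i in range(0, part_1(boarding_passes) + 1))
--
--     for boarding_pass in boarding_passes:
--         place = parse_boarding_pass(boarding_pass)
--         places[place] = True
--
--     for place in [place for place, occupied in places.items() if not occupied]:
--         if (place + 1) in places and (place - 1) in places and places[place - 1] and places[place + 1]: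
--             return place
-- ===== SOURCE B (Python) =====
-- def parse_boarding_pass(boarding_pass):
--     # binary space partitioning by interval arithmetic: keep the lower bound and
--     # the size of the remaining range instead of materializing it
--     row, row_size = 0, 128
--     for c in boarding_pass[:7]:
--         row_size //= 2
--         if c != 'F':
--             row += row_size
--     col, col_size = 0, 8
--     for c in boarding_pass[-3:]:
--         col_size //= 2
--         if c != 'L':
--             col += col_size
--     return row * 8 + col
--
-- def part_2(boarding_passes):
--     seats = {parse_boarding_pass(bp) for bp in boarding_passes}
--     for i in range(max(seats, default=-1) + 1):
--         if i not in seats and i - 1 in seats and i + 1 in seats: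
--             return i
--     return None
-- ===== Notes on version B (the rewrite author's own statement) =====
-- stated objective: faster
-- what changed: parse_boarding_pass is re-implemented as interval arithmetic (tracking the lower bound and size of the remaining seat range) instead of repeatedly materializing and slicing 128-element lists, and part_2 builds a set of seat ids in one parse pass (dropping part_1's second full parse and the dense bool dict) and scans 0..max for a gap with both neighbors present.
import Mathlib
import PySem

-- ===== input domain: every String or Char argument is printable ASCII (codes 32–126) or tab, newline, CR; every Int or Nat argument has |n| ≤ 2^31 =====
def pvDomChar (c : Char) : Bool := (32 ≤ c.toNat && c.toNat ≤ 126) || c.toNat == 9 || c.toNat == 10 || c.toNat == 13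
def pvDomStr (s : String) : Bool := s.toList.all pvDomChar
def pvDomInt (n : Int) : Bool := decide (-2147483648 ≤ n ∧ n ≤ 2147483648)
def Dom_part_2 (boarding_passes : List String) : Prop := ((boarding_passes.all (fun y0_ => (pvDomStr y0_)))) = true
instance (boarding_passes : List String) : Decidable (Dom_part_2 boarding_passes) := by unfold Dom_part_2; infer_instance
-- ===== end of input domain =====

-- B replaces A's materialized-list binary-space-partition parser by interval arithmetic (lower
-- bound + size of the remaining range) and A's part_1-then-dict double pass by one parse pass
-- into a set scanned directly (objective: faster, constant factor).


-- ===== PORT A =====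
-- loop body of A's row loop; 'int(len(l)/2)' is ported as floor division: here len(l) is a
-- nonnegative int ≤ 128, so float division is exact and int() truncation equals floor division
def pvStepRow (l : List Int) (c : Char) : List Int :=
  let middle := PySem.Int.floordiv (PySem.List.len l) 2
  if c = 'F' then PySem.List.slice l none (some middle)
  else PySem.List.slice l (some (-middle)) none

-- loop body of A's column loop
def pvStepCol (l : List Int) (c : Char) : List Int :=
  let middle := PySem.Int.floordiv (PySem.List.len l) 2
  if c = 'L' then PySem.List.slice l none (some middle)
  else PySem.List.slice l (some (-middle)) none

-- A's parse_boarding_pass; 'remaining_ranges[0]'/'remaining_columns[0]' via pyGet? (none = IndexError,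
-- which in fact never happens: the lists keep length 2^(7-i) resp. 2^(3-i))
def parse_boarding_pass (boarding_pass : String) : Option Int :=
  let remaining_ranges := (PySem.List.slice boarding_pass.toList none (some 7)).foldl pvStepRow (PySem.List.pyRange 0 128 1)
  let remaining_columns := (PySem.List.slice boarding_pass.toList (some (-3)) none).foldl pvStepCol (PySem.List.pyRange 0 8 1)
  match PySem.List.pyGet? remaining_ranges 0, PySem.List.pyGet? remaining_columns 0 with
  | some r, some c => some (r * 8 + c)
  | _, _ => none

def part_1 (boarding_passes : List String) : Option Int :=
  boarding_passes.foldl (fun acc bp =>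
    match acc, parse_boarding_pass bp with
    | some result, some place => some (if result < place then place else result)
    | _, _ => none) (some 0)

def part_2 (boarding_passes : List String) : Option Int :=
  match part_1 boarding_passes with
  | none => none
  | some m =>
    let places0 : PySem.Dict Int Bool :=
      PySem.Dict.ofList ((PySem.List.pyRange 0 (m + 1) 1).map (fun i => (i, false)))
    match boarding_passes.foldl (fun od bp =>
        match od, parse_boarding_pass bp with
        | some d, some place => some (d.insert place true)
        | _, _ => none) (some places0) with
    | none => none
    | some places =>
      -- 'places[place - 1]'/'places[place + 1]' are evaluated only after the 'in' tests succeed,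
      -- so getD is exact here
      ((places.items.filter (fun pr => !pr.2)).map (fun pr => pr.1)).find? (fun place =>
        places.contains (place + 1) && places.contains (place - 1) &&
        places.getD (place - 1) false && places.getD (place + 1) false)

-- ===== PORT B =====
def parse_boarding_pass_alt (boarding_pass : String) : Int :=
  let rc := (PySem.List.slice boarding_pass.toList none (some 7)).foldl
      (fun (p : Int × Int) c =>
        let size := PySem.Int.floordiv p.2 2
        (if c ≠ 'F' then p.1 + size else p.1, size)) (0, 128)
  let cc := (PySem.List.slice boarding_pass.toList (some (-3)) none).foldl
      (fun (p : Int × Int) c =>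
        let size := PySem.Int.floordiv p.2 2
        (if c ≠ 'L' then p.1 + size else p.1, size)) (0, 8)
  rc.1 * 8 + cc.1

def part_2_alt (boarding_passes : List String) : Option Int :=
  let seats : PySem.Set Int := PySem.Set.ofList (boarding_passes.map parse_boarding_pass_alt)
  (PySem.List.pyRange 0 (PySem.List.maxD seats (fun x => x) (-1) + 1) 1).find? (fun i =>
    !(PySem.Set.contains seats i) && PySem.Set.contains seats (i - 1) && PySem.Set.contains seats (i + 1))

-- ===== PRECONDITION & SPEC =====
def Spec_part_2 (boarding_passes : List String) (out : Option Int) : Prop := out = part_2_alt boarding_passes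
instance (boarding_passes : List String) (out : Option Int) : Decidable (Spec_part_2 boarding_passes out) := by unfold Spec_part_2; infer_instance

-- ===== CLAIM (what is proved, stated in full; the proofs are below) =====
def Claim_equal_part_2 : Prop := ∀ (boarding_passes : List String), Dom_part_2 boarding_passes → Spec_part_2 boarding_passes (part_2 boarding_passes)

-- ===== LEMMAS AND PROOFS =====

theorem pv_two_pow_cast (j : Nat) : ((2:Int)^j) = ((2^j : Nat) : Int) := by push_cast; ring

theorem pv_bits_shift (g : Char → Int) (cs : List Char) : ∀ b : Int,
    cs.foldl (fun r c => r * 2 + g c) b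
      = b * 2 ^ cs.length + cs.foldl (fun r c => r * 2 + g c) 0 := by
  induction cs with
  | nil => simp
  | cons c rest ih =>
    intro b
    simp only [List.foldl, List.length_cons]
    rw [ih (b * 2 + g c), ih (0 * 2 + g c)]
    ring

theorem pv_step (ch : Char) (c : Char) (lo : Int) (j : Nat)
    (hj : (PySem.List.pyRange lo (lo + 2 ^ (j + 1)) 1).length = 2 ^ (j + 1)) :
    (let middle := PySem.Int.floordiv (PySem.List.len (PySem.List.pyRange lo (lo + 2 ^ (j + 1)) 1)) 2;
      if c = ch then PySem.List.slice (PySem.List.pyRange lo (lo + 2 ^ (j + 1)) 1) none (some middle)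
      else PySem.List.slice (PySem.List.pyRange lo (lo + 2 ^ (j + 1)) 1) (some (-middle)) none)
    = PySem.List.pyRange (lo + (if c = ch then 0 else 1) * 2 ^ j)
        (lo + (if c = ch then 0 else 1) * 2 ^ j + 2 ^ j) 1 := by
  have hpow : (0:Int) < 2 ^ j := by positivity
  have hpow2 : (2:Int) ^ j ≤ 2 ^ (j+1) := by
    apply pow_le_pow_right₀ (by norm_num) (Nat.le_succ j)
  have hsplit := PySem.List.pyRange_one_append lo (lo + 2^j) (lo + 2^(j+1))
    (by linarith) (by linarith)
  have hlen1 : (PySem.List.pyRange lo (lo + 2^j) 1).length = 2^j := by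
    rw [PySem.List.length_pyRange_one]
    rw [add_sub_cancel_left, pv_two_pow_cast, Int.toNat_natCast]
  have hmid : PySem.Int.floordiv ((2^(j+1) : Nat) : Int) 2 = ((2^j : Nat) : Int) := by
    have h2 : ((2:Nat):Int) = (2:Int) := by norm_num
    rw [← h2, PySem.Int.floordiv_natCast]
    norm_num [Nat.pow_succ]
  have hpowsucc : (2:Int)^(j+1) = 2^j + 2^j := by rw [pow_succ]; ring
  show (if c = ch then _ else _) = _
  simp only [PySem.List.len, hj]
  by_cases hc : c = ch
  · rw [if_pos hc, if_pos hc, hmid, PySem.List.slice_to _ (by positivity),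
        Int.toNat_natCast, hsplit, List.take_left' hlen1]
    norm_num
  · rw [if_neg hc, if_neg hc, hmid,
        PySem.List.slice_from_neg_natCast (k := 2^j) _ (by positivity), hj, hsplit,
        List.drop_left' (by rw [hlen1]; omega)]
    rw [one_mul, hpowsucc, ← add_assoc]

theorem pv_loop (ch : Char) (cs : List Char) : ∀ (lo : Int) (k : Nat), cs.length ≤ k →
    cs.foldl (fun l c => let middle := PySem.Int.floordiv (PySem.List.len l) 2;
        if c = ch then PySem.List.slice l none (some middle)
        else PySem.List.slice l (some (-middle)) none)
      (PySem.List.pyRange lo (lo + 2 ^ k) 1)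
    = PySem.List.pyRange
        (lo + (cs.foldl (fun r c => r * 2 + (if c = ch then 0 else 1)) 0) * 2 ^ (k - cs.length))
        (lo + (cs.foldl (fun r c => r * 2 + (if c = ch then 0 else 1)) 0) * 2 ^ (k - cs.length) + 2 ^ (k - cs.length)) 1 := by
  induction cs with
  | nil => intro lo k _; simp
  | cons c rest ih =>
    intro lo k hk
    obtain ⟨j, rfl⟩ : ∃ j, k = j + 1 := ⟨k - 1, by simp at hk; omega⟩
    have hjlen : (PySem.List.pyRange lo (lo + 2 ^ (j + 1)) 1).length = 2 ^ (j + 1) := by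
      rw [PySem.List.length_pyRange_one, add_sub_cancel_left, pv_two_pow_cast, Int.toNat_natCast]
    rw [List.foldl_cons]
    rw [pv_step ch c lo j hjlen]
    have hr : rest.length ≤ j := by simp at hk; omega
    rw [ih _ j hr]
    have hlr : j + 1 - (rest.length + 1) = j - rest.length := by omega
    have hb : rest.foldl (fun r c => r * 2 + (if c = ch then 0 else 1)) (0 * 2 + (if c = ch then 0 else 1))
        = (if c = ch then (0:Int) else 1) * 2 ^ rest.length
          + rest.foldl (fun r c => r * 2 + (if c = ch then 0 else 1)) 0 := by
      rw [pv_bits_shift]; ring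
    have hsplitpow : (2:Int) ^ j = 2 ^ rest.length * 2 ^ (j - rest.length) := by
      rw [← pow_add]; congr 1; omega
    simp only [List.foldl_cons, List.length_cons, hlr, hb, hsplitpow]
    ring_nf

theorem pv_loop' (ch : Char) (cs : List Char) (lo : Int) (k : Nat) (hk : cs.length ≤ k) :
    cs.foldl (fun l c =>
        if c = ch then PySem.List.slice l none (some (PySem.Int.floordiv (PySem.List.len l) 2))
        else PySem.List.slice l (some (-PySem.Int.floordiv (PySem.List.len l) 2)) none)
      (PySem.List.pyRange lo (lo + 2 ^ k) 1)
    = PySem.List.pyRange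
        (lo + (cs.foldl (fun r c => r * 2 + (if c = ch then 0 else 1)) 0) * 2 ^ (k - cs.length))
        (lo + (cs.foldl (fun r c => r * 2 + (if c = ch then 0 else 1)) 0) * 2 ^ (k - cs.length) + 2 ^ (k - cs.length)) 1 :=
  pv_loop ch cs lo k hk

theorem pv_pyGet_zero (a b : Int) (h : a < b) :
    PySem.List.pyGet? (PySem.List.pyRange a b 1) 0 = some a := by
  rw [PySem.List.pyRange_one_cons h]
  simp [PySem.List.pyGet?, PySem.List.pyIdx?]

theorem pv_interval (ch : Char) (cs : List Char) : ∀ (lo : Int) (k : Nat), cs.length ≤ k →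
    cs.foldl (fun (p : Int × Int) c =>
        let size := PySem.Int.floordiv p.2 2
        (if c ≠ ch then p.1 + size else p.1, size)) (lo, 2 ^ k)
    = (lo + (cs.foldl (fun r c => r * 2 + (if c = ch then 0 else 1)) 0) * 2 ^ (k - cs.length),
       2 ^ (k - cs.length)) := by
  induction cs with
  | nil => intro lo k _; simp
  | cons c rest ih =>
    intro lo k hk
    obtain ⟨j, rfl⟩ : ∃ j, k = j + 1 := ⟨k - 1, by simp at hk; omega⟩
    have hr : rest.length ≤ j := by simp at hk; omega
    have hmid : PySem.Int.floordiv ((2:Int) ^ (j + 1)) 2 = 2 ^ j := by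
      rw [pv_two_pow_cast (j + 1), pv_two_pow_cast j]
      have h2 : ((2:Nat):Int) = (2:Int) := by norm_num
      rw [← h2, PySem.Int.floordiv_natCast]
      norm_num [Nat.pow_succ]
    have hb : rest.foldl (fun r c => r * 2 + (if c = ch then 0 else 1)) (0 * 2 + (if c = ch then 0 else 1))
        = (if c = ch then (0:Int) else 1) * 2 ^ rest.length
          + rest.foldl (fun r c => r * 2 + (if c = ch then 0 else 1)) 0 := by
      rw [pv_bits_shift]; ring
    have hsplitpow : (2:Int) ^ j = 2 ^ rest.length * 2 ^ (j - rest.length) := by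
      rw [← pow_add]; congr 1; omega
    have hlr : j + 1 - (rest.length + 1) = j - rest.length := by omega
    simp only [List.foldl_cons, hmid, List.length_cons, hlr, hb]
    by_cases hc : c = ch
    · rw [if_neg (by simp [hc]), ih lo j hr]
      simp [hc]
    · rw [if_pos (by simp [hc]), ih (lo + 2 ^ j) j hr]
      rw [if_neg hc, hsplitpow]
      simp only [Prod.mk.injEq]
      exact ⟨by ring, trivial⟩

theorem pv_parse_eq (bp : String) :
    parse_boarding_pass bp = some (parse_boarding_pass_alt bp) := by
  have h7 : PySem.List.slice bp.toList none (some 7) = bp.toList.take 7 := by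
    rw [PySem.List.slice_to _ (by norm_num : (0:Int) ≤ 7)]
    rfl
  have h3 : PySem.List.slice bp.toList (some (-3)) none = bp.toList.drop (bp.toList.length - 3) :=
    PySem.List.slice_from_neg_ofNat bp.toList 3 (by norm_num)
  have hlen7 : (bp.toList.take 7).length ≤ 7 := by simp
  have hlen3 : (bp.toList.drop (bp.toList.length - 3)).length ≤ 3 := by simp; omega
  have hrow := pv_loop' 'F' (bp.toList.take 7) 0 7 hlen7
  have hcol := pv_loop' 'L' (bp.toList.drop (bp.toList.length - 3)) 0 3 hlen3
  have hirow := pv_interval 'F' (bp.toList.take 7) 0 7 hlen7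
  have hicol := pv_interval 'L' (bp.toList.drop (bp.toList.length - 3)) 0 3 hlen3
  have hp7 : (0:Int) < 2 ^ (7 - (bp.toList.take 7).length) := by positivity
  have hp3 : (0:Int) < 2 ^ (3 - (bp.toList.drop (bp.toList.length - 3)).length) := by positivity
  have hstepr : pvStepRow = (fun l c =>
      if c = 'F' then PySem.List.slice l none (some (PySem.Int.floordiv (PySem.List.len l) 2))
      else PySem.List.slice l (some (-PySem.Int.floordiv (PySem.List.len l) 2)) none) := rfl
  have hstepc : pvStepCol = (fun l c =>
      if c = 'L' then PySem.List.slice l none (some (PySem.Int.floordiv (PySem.List.len l) 2))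
      else PySem.List.slice l (some (-PySem.Int.floordiv (PySem.List.len l) 2)) none) := rfl
  simp only [parse_boarding_pass, parse_boarding_pass_alt, h7, h3]
  rw [hstepr, hstepc, show PySem.List.pyRange 0 128 1 = PySem.List.pyRange 0 (0 + 2^7) 1 by norm_num,
      show PySem.List.pyRange 0 8 1 = PySem.List.pyRange 0 (0 + 2^3) 1 by norm_num,
      hrow, hcol,
      show (128:Int) = 2^7 by norm_num, show (8:Int) = 2^3 by norm_num,
      show ((0:Int), (2:Int)^7) = (((0:Int)) , (2:Int)^7) from rfl,
      hirow, hicol,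
      pv_pyGet_zero _ _ (by linarith), pv_pyGet_zero _ _ (by linarith)]

theorem pv_bits_nonneg (g : Char → Int) (hg : ∀ c, 0 ≤ g c) (cs : List Char) :
    ∀ b : Int, 0 ≤ b → 0 ≤ cs.foldl (fun r c => r * 2 + g c) b := by
  induction cs with
  | nil => intro b hb; simpa using hb
  | cons c rest ih =>
    intro b hb
    simp only [List.foldl]
    exact ih _ (by have := hg c; linarith)

theorem pv_parse_nonneg (bp : String) : 0 ≤ parse_boarding_pass_alt bp := by
  have hlen7 : (PySem.List.slice bp.toList none (some 7)).length ≤ 7 := by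
    rw [PySem.List.slice_to _ (by norm_num : (0:Int) ≤ 7)]
    simp
  have hlen3 : (PySem.List.slice bp.toList (some (-3)) none).length ≤ 3 := by
    rw [PySem.List.slice_from_neg_ofNat bp.toList 3 (by norm_num)]
    simp; omega
  have hirow := pv_interval 'F' (PySem.List.slice bp.toList none (some 7)) 0 7 hlen7
  have hicol := pv_interval 'L' (PySem.List.slice bp.toList (some (-3)) none) 0 3 hlen3
  have hb7 := pv_bits_nonneg (fun c => if c = 'F' then 0 else 1) (by intro c; dsimp; split <;> norm_num)
    (PySem.List.slice bp.toList none (some 7)) 0 le_rfl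
  have hb3 := pv_bits_nonneg (fun c => if c = 'L' then 0 else 1) (by intro c; dsimp; split <;> norm_num)
    (PySem.List.slice bp.toList (some (-3)) none) 0 le_rfl
  simp only [parse_boarding_pass_alt,
    show ((0:Int), (128:Int)) = (((0:Int)), (2:Int)^7) by norm_num,
    show ((0:Int), (8:Int)) = (((0:Int)), (2:Int)^3) by norm_num, hirow, hicol]
  have p7 : (0:Int) ≤ 2 ^ (7 - (PySem.List.slice bp.toList none (some 7)).length) := by positivity
  have p3 : (0:Int) ≤ 2 ^ (3 - (PySem.List.slice bp.toList (some (-3)) none).length) := by positivity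
  have h1 := mul_nonneg (mul_nonneg hb7 p7) (show (0:Int) ≤ 8 by norm_num)
  have h2 := mul_nonneg hb3 p3
  linarith

theorem pv_max_if (a b : Int) : (if a < b then b else a) = max a b := by
  rcases le_total a b with h | h <;> simp [max_def] <;> omega

theorem pv_part_1_aux (bps : List String)
    (hall : ∀ bp ∈ bps, parse_boarding_pass bp = some (parse_boarding_pass_alt bp)) : ∀ a : Int,
    bps.foldl (fun acc bp =>
      match acc, parse_boarding_pass bp with
      | some result, some place => some (if result < place then place else result)
      | _, _ => none) (some a)
    = some ((bps.map parse_boarding_pass_alt).foldl max a) := by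
  induction bps with
  | nil => intro a; rfl
  | cons bp rest ih =>
    intro a
    simp only [List.foldl_cons, List.map_cons, hall bp (by simp)]
    rw [pv_max_if, ih (fun b hb => hall b (by simp [hb]))]

theorem pv_part_1_eq (bps : List String)
    (hall : ∀ bp ∈ bps, parse_boarding_pass bp = some (parse_boarding_pass_alt bp)) :
    part_1 bps = some ((bps.map parse_boarding_pass_alt).foldl max 0) := by
  unfold part_1
  exact pv_part_1_aux bps hall 0

theorem pv_find?_filter {α : Type} (l : List α) (p q : α → Bool) :
    (l.filter p).find? q = l.find? (fun x => p x && q x) := by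
  induction l with
  | nil => rfl
  | cons x t ih =>
    by_cases hp : p x
    · by_cases hq : q x <;> simp [List.filter, hp, hq, List.find?, ih]
    · simp [List.filter, hp, List.find?, ih]

theorem pv_find?_congr {α : Type} (l : List α) (p q : α → Bool) (h : ∀ x ∈ l, p x = q x) :
    l.find? p = l.find? q := by
  induction l with
  | nil => rfl
  | cons x t ih =>
    have hx := h x (by simp)
    by_cases hp : p x
    · simp [List.find?, hp, hx ▸ hp]
    · have : q x = false := by rw [← hx]; exact Bool.eq_false_iff.mpr hp
      simp [List.find?, Bool.eq_false_iff.mpr hp, this]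
      exact ih (fun y hy => h y (by simp [hy]))

theorem pv_items_ofList (R : List Int) (hnd : R.Nodup) :
    (PySem.Dict.ofList (R.map (fun i => (i, false)))).items = R.map (fun i => (i, false)) := by
  show ((R.map (fun i => (i, false))).foldl (fun acc p => acc.insert p.1 p.2) PySem.Dict.empty).items = _
  rw [PySem.Dict.items_foldl_insert_fresh _ Prod.fst Prod.snd _
      (fun a _ => PySem.Dict.contains_empty a.1) (by simpa [List.map_map, Function.comp_def] using hnd)]
  simp [Function.comp_def, PySem.Dict.empty]

theorem pv_dict_items (l : List Int) : ∀ (d : PySem.Dict Int Bool) (R : List Int) (g : Int → Bool),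
    d.items = R.map (fun i => (i, g i)) → (∀ p ∈ l, p ∈ R) →
    (l.foldl (fun d p => d.insert p true) d).items
      = R.map (fun i => (i, g i || l.contains i)) := by
  induction l with
  | nil => intro d R g hitems _; simpa using hitems
  | cons p rest ih =>
    intro d R g hitems hsub
    have hp : p ∈ R := hsub p (by simp)
    have hcont : d.contains p = true := by
      rw [PySem.Dict.contains_eq_decide_mem_keys]
      simp [PySem.Dict.keys, hitems, List.map_map]
      exact hp
    have hitems' : (d.insert p true).items = R.map (fun i => (i, ((i == p) || g i))) := by
      rw [PySem.Dict.items_insert_of_contains d true hcont, hitems, List.map_map]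
      apply List.map_congr_left
      intro i hi
      by_cases h : i = p
      · simp [Function.comp, h]
      · simp [Function.comp, h]
    rw [List.foldl_cons, ih (d.insert p true) R _ hitems' (fun q hq => hsub q (by simp [hq]))]
    apply List.map_congr_left
    intro i hi
    by_cases h : i = p <;> by_cases hr : i ∈ rest <;> simp [h, hr]

theorem pv_dictfold_aux (bps : List String)
    (hall : ∀ bp ∈ bps, parse_boarding_pass bp = some (parse_boarding_pass_alt bp)) :
    ∀ d : PySem.Dict Int Bool,
    bps.foldl (fun od bp =>
      match od, parse_boarding_pass bp with
      | some d, some place => some (d.insert place true)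
      | _, _ => none) (some d)
    = some ((bps.map parse_boarding_pass_alt).foldl (fun d p => d.insert p true) d) := by
  induction bps with
  | nil => intro d; rfl
  | cons bp rest ih =>
    intro d
    simp only [List.foldl_cons, List.map_cons, hall bp (by simp)]
    exact ih (fun b hb => hall b (by simp [hb])) _

theorem pv_contains_iff (l : List Int) (x : Int) : l.contains x = true ↔ x ∈ l :=
  List.contains_iff_mem

theorem part_2_spec_aux (bps : List String) :
    part_2 bps = part_2_alt bps := by
  have hall : ∀ bp ∈ bps, parse_boarding_pass bp = some (parse_boarding_pass_alt bp) :=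
    fun bp _ => pv_parse_eq bp
  cases bps with
  | nil => decide
  | cons bp0 rest =>
  set sl := (bp0 :: rest).map parse_boarding_pass_alt with hsl
  set M := sl.foldl max 0 with hMdef
  have hub : ∀ p ∈ sl, p ≤ M := (PySem.List.le_foldl_max sl 0).2
  have hlb : ∀ p ∈ sl, 0 ≤ p := by
    intro p hp
    obtain ⟨s, _, rfl⟩ := List.mem_map.mp hp
    exact pv_parse_nonneg s
  have hM0 : 0 ≤ M := (PySem.List.le_foldl_max sl 0).1
  set R := PySem.List.pyRange 0 (M + 1) 1 with hR
  have hndR := PySem.List.nodup_pyRange_one 0 (M + 1)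
  have hsub : ∀ p ∈ sl, p ∈ R := fun p hp =>
    PySem.List.mem_pyRange_one.mpr ⟨hlb p hp, by have := hub p hp; omega⟩
  have hit0 := pv_items_ofList R hndR
  have hitems := pv_dict_items sl _ R (fun _ => false) hit0 hsub
  simp only [Bool.false_or] at hitems
  set D := sl.foldl (fun d p => d.insert p true)
      (PySem.Dict.ofList (R.map (fun i => (i, false)))) with hD
  have hkeys : D.keys = R := by
    simp only [PySem.Dict.keys, hitems, List.map_map]
    simp [Function.comp_def]
  have hkeysnd : D.keys.Nodup := hkeys ▸ hndR
  have hcont : ∀ x, D.contains x = decide (0 ≤ x ∧ x < M + 1) := by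
    intro x
    rw [PySem.Dict.contains_eq_decide_mem_keys, hkeys, hR,
        decide_eq_decide.mpr PySem.List.mem_pyRange_one]
  have hgetD : ∀ x, D.getD x false = ((decide (0 ≤ x ∧ x < M + 1)) && sl.contains x) := by
    intro x
    by_cases hx : x ∈ R
    · have hxb := PySem.List.mem_pyRange_one.mp hx
      have hmem : (x, sl.contains x) ∈ D.items := by
        rw [hitems]; exact List.mem_map.mpr ⟨x, hx, rfl⟩
      rw [PySem.Dict.getD_of_mem_items D hmem hkeysnd false, decide_eq_true hxb,
          Bool.true_and]
    · have hxb : ¬ (0 ≤ x ∧ x < M + 1) := fun hc => hx (PySem.List.mem_pyRange_one.mpr hc)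
      have hxc : D.contains x = false := by rw [hcont x]; exact decide_eq_false hxb
      rw [PySem.Dict.getD_of_not_contains _ _ hxc, decide_eq_false hxb, Bool.false_and]
  -- the LHS
  show part_2 (bp0 :: rest) = part_2_alt (bp0 :: rest)
  rw [part_2, pv_part_1_eq _ hall, ← hsl, ← hMdef]
  simp only [pv_dictfold_aux _ hall, ← hsl, ← hR, ← hD]
  rw [hitems, List.filter_map, List.map_map]
  have hfm : ((fun pr : Int × Bool => pr.1) ∘ (fun i => (i, sl.contains i))) = fun i => i := rfl
  have hff : ((fun pr : Int × Bool => !pr.2) ∘ (fun i => (i, sl.contains i))) = fun i => !(sl.contains i) := rfl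
  rw [hfm, hff, List.map_id', pv_find?_filter]
  -- the RHS
  rw [part_2_alt]
  have hsetc : ∀ x, PySem.Set.contains (PySem.Set.ofList sl) x = sl.contains x := by
    intro x
    rw [PySem.Set.contains_eq_listContains, Bool.eq_iff_iff,
        pv_contains_iff, pv_contains_iff]
    exact PySem.Set.mem_ofList sl x
  have htop : PySem.List.maxD (PySem.Set.ofList sl) (fun x => x) (-1) = M := by
    cases hmx : PySem.List.max? (PySem.Set.ofList sl) (fun x : Int => x) with
    | none =>
      exfalso
      rw [PySem.List.max?_eq_none_iff] at hmx
      rw [hsl] at hmx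
      simp [PySem.Set.ofList_cons] at hmx
    | some t =>
      simp only [PySem.List.maxD, hmx, Option.getD_some]
      have ht1 : t ∈ sl := (PySem.Set.mem_ofList sl t).mp (PySem.List.max?_mem hmx)
      have hle : t ≤ M := hub t ht1
      have hge : M ≤ t := by
        rcases PySem.List.foldl_max_mem sl 0 with h0 | hmem
        · rw [← hMdef] at h0
          rw [h0]
          exact hlb t ht1
        · refine PySem.List.max?_isMax hmx M ((PySem.Set.mem_ofList sl M).mpr ?_)
          rw [hMdef]
          exact hmem
      omega
  simp only [← hsl, htop, ← hR]
  -- pointwise equality of the two find? predicates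
  apply pv_find?_congr
  intro i hiR
  have hib := PySem.List.mem_pyRange_one.mp hiR
  have hbnd : ∀ x, sl.contains x = true → (0 ≤ x ∧ x ≤ M) := by
    intro x hx
    have hx' := (pv_contains_iff sl x).mp hx
    exact ⟨hlb x hx', hub x hx'⟩
  rw [hcont (i + 1)]
  rw [hcont (i - 1)]
  rw [hgetD (i - 1)]
  rw [hgetD (i + 1)]
  rw [hsetc i]
  rw [hsetc (i - 1)]
  rw [hsetc (i + 1)]
  cases hm1 : sl.contains (i - 1) <;> cases hp1 : sl.contains (i + 1)
  · simp
  · simp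
  · have h1 := hbnd _ hm1
    simp [show (0 ≤ i - 1 ∧ i - 1 < M + 1) from by omega]
  · have h1 := hbnd _ hm1
    have h2 := hbnd _ hp1
    simp [show (0 ≤ i - 1 ∧ i - 1 < M + 1) from by omega,
      show (0 ≤ i + 1 ∧ i + 1 < M + 1) from by omega]
    intro _
    omega

-- ===== VERDICT (by name: the statement is the Claim_ definition above) =====
theorem part_2_spec : Claim_equal_part_2 := by
  intro bps _
  unfold Spec_part_2
  exact part_2_spec_aux bps
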